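-- pv_equiv track=rewrite | github.com/harshitha241291/algovisual | app.py | generate_merge_sort_steps
-- ===== SOURCE A (Python) =====
-- def generate_merge_sort_steps(arr):
--     steps = []
--     def merge_sort(a, l, r):
--         if l < r:
--             m = (l + r) // 2
--             merge_sort(a, l, m)
--             merge_sort(a, m+1, r)
--             merge(a, l, m, r)
--
--     def merge(a, l, m, r):
--         left = a[l:m+1]
--         right = a[m+1:r+1]
--         i = j = 0
--         k = l
--         while i < len(left) and j < len(right):
--             steps.append((a.copy(), (k,), False))
--             if left[i] <= right[j]:
--                 a[k] = left[i]
--                 i += 1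
--             else:
--                 a[k] = right[j]
--                 j += 1
--             steps.append((a.copy(), (k,), True))
--             k += 1
--         while i < len(left):
--             a[k] = left[i]
--             steps.append((a.copy(), (k,), True))
--             i += 1
--             k += 1
--         while j < len(right):
--             a[k] = right[j]
--             steps.append((a.copy(), (k,), True))
--             j += 1
--             k += 1
--
--     a = arr.copy()
--     merge_sort(a, 0, len(a)-1)
--     return steps
-- ===== SOURCE B (Python) =====
-- def generate_merge_sort_steps(arr):
--     # Phase 1: precompute the post-order schedule of merge ranges (pure function of len).
--     def schedule(l, r):
--         if l >= r:
--             return []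
--         m = (l + r) // 2
--         return schedule(l, m) + schedule(m + 1, r) + [(l, m, r)]
--
--     steps = []
--     a = arr.copy()
--     for (l, m, r) in schedule(0, len(a) - 1):
--         left = a[l:m + 1]
--         right = a[m + 1:r + 1]
--         # Pure merge: list of (value, chosen_by_comparison) pairs.
--         merged = []
--         i = j = 0
--         while i < len(left) and j < len(right):
--             if left[i] <= right[j]:
--                 merged.append((left[i], True))
--                 i += 1
--             else:
--                 merged.append((right[j], True))
--                 j += 1
--         merged.extend((x, False) for x in left[i:])
--         merged.extend((y, False) for y in right[j:])
--         # Phase 2: apply writes one by one, emitting snapshots.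
--         for off, (v, c) in enumerate(merged):
--             k = l + off
--             if c:
--                 steps.append((a.copy(), (k,), False))
--             a[k] = v
--             steps.append((a.copy(), (k,), True))
--     return steps
-- ===== Notes on version B (the rewrite author's own statement) =====
-- stated objective: alternative
-- what changed: B first precomputes the post-order schedule of merge ranges as a pure list, then for each range builds the merged sequence purely as (value, chosen-by-comparison) pairs and applies the writes in a single snapshot-emitting pass, replacing A's recursive driver and three-while-loop in-place merge.
import Mathlib
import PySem

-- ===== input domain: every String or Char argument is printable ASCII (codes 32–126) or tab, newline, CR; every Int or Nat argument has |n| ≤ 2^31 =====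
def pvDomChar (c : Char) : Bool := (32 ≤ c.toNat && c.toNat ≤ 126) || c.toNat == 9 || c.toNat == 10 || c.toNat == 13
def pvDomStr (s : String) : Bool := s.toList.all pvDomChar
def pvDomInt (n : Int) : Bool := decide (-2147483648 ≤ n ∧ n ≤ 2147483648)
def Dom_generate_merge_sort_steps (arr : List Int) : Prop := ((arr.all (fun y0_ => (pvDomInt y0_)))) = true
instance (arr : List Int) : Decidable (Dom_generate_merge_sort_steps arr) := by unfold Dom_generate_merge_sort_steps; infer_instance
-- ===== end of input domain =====

-- B replaces A's recursive driver + three-while-loop in-place merge by a precomputed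
-- post-order schedule of merge ranges, a pure merge into (value, flag) pairs, and a
-- single snapshot-emitting write pass; objective: alternative decomposition, same cost.

-- ===== PORT A =====
-- the while loops walk the remaining suffixes of `left`/`right` (left[i:] / right[j:])

-- third while loop: copy the rest of `right`
def pvMergeLoop3 (rrem : List Int) (k : Int) (a : List Int)
    (steps : List (List Int × List Int × Bool)) : List Int × List (List Int × List Int × Bool) :=
  match rrem with
  | [] => (a, steps)
  | y :: rt =>
      let a1 := PySem.List.pySetD a k y
      pvMergeLoop3 rt (k + 1) a1 (steps ++ [(a1, [k], true)])

-- second while loop: copy the rest of `left`, then fall through to loop 3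
def pvMergeLoop2 (lrem rrem : List Int) (k : Int) (a : List Int)
    (steps : List (List Int × List Int × Bool)) : List Int × List (List Int × List Int × Bool) :=
  match lrem with
  | [] => pvMergeLoop3 rrem k a steps
  | x :: lt =>
      let a1 := PySem.List.pySetD a k x
      pvMergeLoop2 lt rrem (k + 1) a1 (steps ++ [(a1, [k], true)])

-- first while loop (both runs nonempty), then fall through to loop 2;
-- `fuel` only makes the recursion structural: one element is consumed per step, so
-- fuel = |left| + |right| at the call site is never exhausted before a run empties
def pvMergeLoop1 (fuel : Nat) (lrem rrem : List Int) (k : Int) (a : List Int)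
    (steps : List (List Int × List Int × Bool)) : List Int × List (List Int × List Int × Bool) :=
  match fuel, lrem, rrem with
  | fuel' + 1, x :: lt, y :: rt =>
      let steps1 := steps ++ [(a, [k], false)]
      if x ≤ y then
        let a1 := PySem.List.pySetD a k x
        pvMergeLoop1 fuel' lt (y :: rt) (k + 1) a1 (steps1 ++ [(a1, [k], true)])
      else
        let a1 := PySem.List.pySetD a k y
        pvMergeLoop1 fuel' (x :: lt) rt (k + 1) a1 (steps1 ++ [(a1, [k], true)])
  | _, lrem', rrem' => pvMergeLoop2 lrem' rrem' k a steps

def pvMerge (a : List Int) (l m r : Int) (steps : List (List Int × List Int × Bool)) :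
    List Int × List (List Int × List Int × Bool) :=
  let lft := PySem.List.slice a (some l) (some (m + 1))
  let rgt := PySem.List.slice a (some (m + 1)) (some (r + 1))
  pvMergeLoop1 (lft.length + rgt.length) lft rgt l a steps

-- A's recursive merge_sort, threading the (a, steps) state; `fuel` only makes the
-- recursion structural: every call strictly shrinks (r-l).toNat, so fuel = len(arr)
-- at the top call is never exhausted on a range the Python recursion reaches
def pvMergeSortRec (fuel : Nat) (a : List Int) (l r : Int)
    (steps : List (List Int × List Int × Bool)) : List Int × List (List Int × List Int × Bool) :=
  match fuel with
  | 0 => (a, steps)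
  | fuel' + 1 =>
      if l < r then
        let m := PySem.Int.floordiv (l + r) 2
        let s1 := pvMergeSortRec fuel' a l m steps
        let s2 := pvMergeSortRec fuel' s1.1 (m + 1) r s1.2
        pvMerge s2.1 l m r s2.2
      else (a, steps)

def generate_merge_sort_steps (arr : List Int) : List (List Int × List Int × Bool) :=
  (pvMergeSortRec arr.length arr 0 ((arr.length : Int) - 1) []).2

-- ===== PORT B =====
-- B's `schedule(l, r)`: the post-order list of merge ranges; `fuel` only makes the
-- recursion structural (every call strictly shrinks (r-l).toNat, so fuel = len(arr) suffices)
def pvSchedule (fuel : Nat) (l r : Int) : List (Int × Int × Int) :=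
  match fuel with
  | 0 => []
  | fuel' + 1 =>
      if l < r then
        let m := PySem.Int.floordiv (l + r) 2
        pvSchedule fuel' l m ++ pvSchedule fuel' (m + 1) r ++ [(l, m, r)]
      else []

-- B's pure merge while loop + the two extends: (value, chosen-by-comparison) pairs
def pvMergedPairs (ls rs : List Int) : List (Int × Bool) :=
  match ls, rs with
  | [], rs' => rs'.map (fun y => (y, false))
  | ls', [] => ls'.map (fun x => (x, false))
  | x :: lt, y :: rt =>
      if x ≤ y then (x, true) :: pvMergedPairs lt (y :: rt)
      else (y, true) :: pvMergedPairs (x :: lt) rt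

-- B's write pass: apply the merged values at k = l, l+1, …, emitting snapshots
def pvWritePass (merged : List (Int × Bool)) (k : Int) (a : List Int)
    (steps : List (List Int × List Int × Bool)) : List Int × List (List Int × List Int × Bool) :=
  match merged with
  | [] => (a, steps)
  | (v, c) :: rest =>
      let steps1 := if c then steps ++ [(a, [k], false)] else steps
      let a1 := PySem.List.pySetD a k v
      pvWritePass rest (k + 1) a1 (steps1 ++ [(a1, [k], true)])

-- B's for-loop body over one scheduled range
def pvDoMerge (a : List Int) (l m r : Int) (steps : List (List Int × List Int × Bool)) :
    List Int × List (List Int × List Int × Bool) :=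
  let lft := PySem.List.slice a (some l) (some (m + 1))
  let rgt := PySem.List.slice a (some (m + 1)) (some (r + 1))
  pvWritePass (pvMergedPairs lft rgt) l a steps

-- B's for loop over the schedule
def pvRunSched (sched : List (Int × Int × Int)) (a : List Int)
    (steps : List (List Int × List Int × Bool)) : List Int × List (List Int × List Int × Bool) :=
  match sched with
  | [] => (a, steps)
  | (l, m, r) :: rest =>
      let s := pvDoMerge a l m r steps
      pvRunSched rest s.1 s.2

def generate_merge_sort_steps_alt (arr : List Int) : List (List Int × List Int × Bool) :=
  (pvRunSched (pvSchedule arr.length 0 ((arr.length : Int) - 1)) arr []).2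

-- ===== PRECONDITION & SPEC =====
def Spec_generate_merge_sort_steps (arr : List Int) (out : List (List Int × List Int × Bool)) : Prop := out = generate_merge_sort_steps_alt arr
instance (arr : List Int) (out : List (List Int × List Int × Bool)) : Decidable (Spec_generate_merge_sort_steps arr out) := by unfold Spec_generate_merge_sort_steps; infer_instance

-- ===== CLAIM (what is proved, stated in full; the proofs are below) =====
def Claim_equal_generate_merge_sort_steps : Prop := ∀ (arr : List Int), Dom_generate_merge_sort_steps arr → Spec_generate_merge_sort_steps arr (generate_merge_sort_steps arr)

-- ===== LEMMAS AND PROOFS =====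

-- B's write pass on an all-`false` tail is A's third while loop
theorem pvWritePass_false_right (rs : List Int) : ∀ (k : Int) (a : List Int)
    (steps : List (List Int × List Int × Bool)),
    pvWritePass (rs.map (fun y => (y, false))) k a steps = pvMergeLoop3 rs k a steps := by
  induction rs with
  | nil => intro k a steps; rfl
  | cons y rt ih =>
      intro k a steps
      simp only [List.map, pvWritePass, pvMergeLoop3, if_neg (by simp : ¬ (false = true))]
      exact ih _ _ _

-- B's write pass on an all-`false` left tail is A's second while loop (with empty right run)
theorem pvWritePass_false_left (ls : List Int) : ∀ (k : Int) (a : List Int)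
    (steps : List (List Int × List Int × Bool)),
    pvWritePass (ls.map (fun x => (x, false))) k a steps = pvMergeLoop2 ls [] k a steps := by
  induction ls with
  | nil => intro k a steps; rfl
  | cons x lt ih =>
      intro k a steps
      simp only [List.map, pvWritePass, pvMergeLoop2, if_neg (by simp : ¬ (false = true))]
      exact ih _ _ _

-- B's pure-merge-then-write equals A's three while loops, for any fuel ≥ |ls| + |rs|
theorem pvWritePass_merged (n : Nat) : ∀ (ls rs : List Int), ls.length + rs.length ≤ n →
    ∀ (f : Nat), ls.length + rs.length ≤ f →
    ∀ (k : Int) (a : List Int) (steps : List (List Int × List Int × Bool)),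
    pvWritePass (pvMergedPairs ls rs) k a steps = pvMergeLoop1 f ls rs k a steps := by
  induction n with
  | zero =>
      intro ls rs hn f hf k a steps
      have hl : ls = [] := by cases ls <;> simp_all
      have hr : rs = [] := by cases rs <;> simp_all
      subst hl; subst hr
      cases f <;>
        simp [pvMergedPairs, pvWritePass, pvMergeLoop1, pvMergeLoop2, pvMergeLoop3]
  | succ n ih =>
      intro ls rs hn f hf k a steps
      cases ls with
      | nil =>
          have hstep : pvMergeLoop1 f [] rs k a steps = pvMergeLoop2 [] rs k a steps := by
            cases f <;> rfl
          rw [hstep]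
          simpa [pvMergedPairs, pvMergeLoop2] using pvWritePass_false_right rs k a steps
      | cons x lt =>
        cases rs with
        | nil =>
            have hstep : pvMergeLoop1 f (x :: lt) [] k a steps =
                pvMergeLoop2 (x :: lt) [] k a steps := by
              cases f <;> rfl
            rw [hstep]
            simpa [pvMergedPairs] using pvWritePass_false_left (x :: lt) k a steps
        | cons y rt =>
            obtain ⟨f', rfl⟩ : ∃ f', f = f' + 1 :=
              ⟨f - 1, by simp at hf; omega⟩
            simp only [pvMergedPairs, pvMergeLoop1]
            by_cases hxy : x ≤ y
            · simp only [hxy, if_true, pvWritePass]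
              exact ih lt (y :: rt) (by simp_all; omega) f' (by simp_all; omega) _ _ _
            · simp only [hxy, if_false, pvWritePass]
              exact ih (x :: lt) rt (by simp_all; omega) f' (by simp_all; omega) _ _ _

-- B's per-range step equals A's in-place `merge`
theorem pvDoMerge_eq_pvMerge (a : List Int) (l m r : Int)
    (steps : List (List Int × List Int × Bool)) :
    pvDoMerge a l m r steps = pvMerge a l m r steps := by
  unfold pvDoMerge pvMerge
  exact pvWritePass_merged _ _ _ (le_refl _) _ (le_refl _) _ _ _

-- running B's schedule for a range is exactly A's recursive merge_sort on that range
theorem pvRunSched_schedule (f : Nat) : ∀ (l r : Int), (r - l).toNat < f →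
    ∀ (rest : List (Int × Int × Int)) (a : List Int)
      (steps : List (List Int × List Int × Bool)),
    pvRunSched (pvSchedule f l r ++ rest) a steps =
      pvRunSched rest (pvMergeSortRec f a l r steps).1 (pvMergeSortRec f a l r steps).2 := by
  induction f with
  | zero => intro l r h; omega
  | succ f' ih =>
      intro l r h rest a steps
      by_cases hlr : l < r
      · have hE : PySem.Int.floordiv (l + r) 2 = (l + r) / 2 :=
          PySem.Int.floordiv_eq_ediv_of_pos (by omega)
        simp only [pvSchedule, pvMergeSortRec, hlr, if_true, hE, List.append_assoc]
        rw [ih l ((l + r) / 2) (by omega)]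
        rw [ih ((l + r) / 2 + 1) r (by omega)]
        simp only [List.cons_append, List.nil_append, pvRunSched]
        rw [pvDoMerge_eq_pvMerge]
      · simp only [pvSchedule, pvMergeSortRec, hlr, if_false, List.nil_append]

-- ===== VERDICT (by name: the statement is the Claim_ definition above) =====
theorem generate_merge_sort_steps_spec : Claim_equal_generate_merge_sort_steps := by
  intro arr _
  unfold Spec_generate_merge_sort_steps generate_merge_sort_steps generate_merge_sort_steps_alt
  rcases arr with _ | ⟨x, xs⟩
  · rfl
  · have h : (((x :: xs).length : Int) - 1 - 0).toNat < (x :: xs).length := by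
      simp [List.length_cons]
    have := pvRunSched_schedule (x :: xs).length 0 (((x :: xs).length : Int) - 1) h
      [] (x :: xs) []
    rw [← List.append_nil (pvSchedule (x :: xs).length 0 (((x :: xs).length : Int) - 1))]
    rw [this]
    rfl
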